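-- pv_equiv track=rewrite | github.com/Nakyss/BotDiscord | functions.py | calculNbMess
-- ===== SOURCE A (Python) =====
-- def calculNbMess(message:str,nbRep:int):
--     """Retourne un tableau avec le nombre de message à envoyé, le nombre de rep dans les n-1 message et le nombre de rep dans le dernier."""
--
--     tab=[5,0,0]
--
--     #Nombre de fois le message à spam par message envoyé
--     nbByMess = nbRep//5
--
--     #Nombre de fois le message à spam pour le dernier message à envoyé
--     lastMess = nbRep%5
--
--     #Nombre de caractères par message envoyé.
--     nbChar = (len(message)+1)*nbByMess
--
--     #ça je l'ai fait mais j'ai aucune idée comment ça marche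
--     if (nbChar > 2000):
--         nbByMess = 2000 / int(len(message)+1)
--         nbByMess=int(nbByMess)
--         totalRep = nbByMess * 5
--
--         while (nbRep - totalRep > nbByMess):
--             totalRep += nbByMess
--             tab[0] += 1
--
--         lastMess = nbRep - totalRep
--
--     tab[1] = nbByMess
--     tab[2] = lastMess
--
--     return tab
-- ===== SOURCE B (Python) =====
-- def calculNbMess(message: str, nbRep: int):
--     """Closed-form version: the iteration count of A's while-loop is computed
--     directly with a ceiling division instead of incrementing step by step."""
--     nbByMess, lastMess = divmod(nbRep, 5)
--     if (len(message) + 1) * nbByMess > 2000: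
--         b = 2000 // (len(message) + 1)
--         k = max(0, -((-nbRep) // b) - 6)
--         return [5 + k, b, nbRep - (5 + k) * b]
--     return [5, nbByMess, lastMess]
-- ===== Notes on version B (the rewrite author's own statement) =====
-- stated objective: simpler
-- what changed: B replaces A's incremental while-loop (which adds nbByMess to totalRep one step at a time to count extra messages) by a closed-form ceiling division computing the iteration count directly.
import Mathlib
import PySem

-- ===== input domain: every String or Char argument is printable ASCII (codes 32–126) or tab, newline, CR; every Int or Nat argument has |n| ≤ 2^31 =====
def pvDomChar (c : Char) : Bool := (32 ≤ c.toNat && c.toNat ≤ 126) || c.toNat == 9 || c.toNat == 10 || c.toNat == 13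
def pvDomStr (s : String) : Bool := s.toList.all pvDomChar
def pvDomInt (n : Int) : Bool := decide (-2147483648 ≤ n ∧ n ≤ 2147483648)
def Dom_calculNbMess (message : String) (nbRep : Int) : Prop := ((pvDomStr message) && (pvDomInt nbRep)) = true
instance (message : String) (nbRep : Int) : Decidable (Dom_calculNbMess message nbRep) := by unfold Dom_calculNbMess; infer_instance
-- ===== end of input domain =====

-- B replaces A's step-by-step while-loop by a closed-form ceiling division computing the
-- iteration count directly (objective: simpler).

-- ===== PORT A =====
-- A's while-loop: state (totalRep, tab0); fuel only makes the recursion total (outside Pre_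
-- the Python loop never terminates, and the fuel supplied below is proved sufficient inside Pre_).
def calculNbMessLoop (nbRep b : Int) : Nat → Int × Int → Int × Int
  | 0, s => s
  | fuel + 1, (totalRep, tab0) =>
    if b < nbRep - totalRep then
      calculNbMessLoop nbRep b fuel (totalRep + b, tab0 + 1)
    else (totalRep, tab0)

def calculNbMess (message : String) (nbRep : Int) : List Int :=
  let nbByMess := PySem.Int.floordiv nbRep 5
  let lastMess := PySem.Int.mod nbRep 5
  let nbChar := (PySem.Str.len message + 1) * nbByMess
  if 2000 < nbChar then
    -- int(2000 / int(len(message)+1)): float division then truncation; exact as floor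
    -- division here (both operands positive and ≤ 2001, far below 2^53).
    let nbByMess2 := PySem.Int.floordiv 2000 (PySem.Str.len message + 1)
    let r := calculNbMessLoop nbRep nbByMess2 (nbRep.toNat + 1) (nbByMess2 * 5, 5)
    [r.2, nbByMess2, nbRep - r.1]
  else
    [5, nbByMess, lastMess]

-- ===== PORT B =====
def calculNbMess_alt (message : String) (nbRep : Int) : List Int :=
  let nbByMess := PySem.Int.floordiv nbRep 5
  let lastMess := PySem.Int.mod nbRep 5
  if 2000 < (PySem.Str.len message + 1) * nbByMess then
    let b := PySem.Int.floordiv 2000 (PySem.Str.len message + 1)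
    let k := max 0 (-(PySem.Int.floordiv (-nbRep) b) - 6)
    [5 + k, b, nbRep - (5 + k) * b]
  else
    [5, nbByMess, lastMess]

-- ===== PRECONDITION & SPEC =====
-- Pre_ excludes only the inputs (len(message) ≥ 2000 and nbRep ≥ 5) on which A's while-loop
-- increments totalRep by 0 and therefore never terminates (Python A diverges; no value is returned).
def Pre_calculNbMess (message : String) (nbRep : Int) : Prop :=
  PySem.Str.len message < 2000 ∨ nbRep < 5
instance (message : String) (nbRep : Int) : Decidable (Pre_calculNbMess message nbRep) := by
  unfold Pre_calculNbMess; infer_instance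

def pvWitness_calculNbMess : String × Int := ("hello", 42)

def Spec_calculNbMess (message : String) (nbRep : Int) (out : List Int) : Prop := out = calculNbMess_alt message nbRep
instance (message : String) (nbRep : Int) (out : List Int) : Decidable (Spec_calculNbMess message nbRep out) := by unfold Spec_calculNbMess; infer_instance

-- ===== CLAIM (what is proved, stated in full; the proofs are below) =====
def Claim_equal_calculNbMess : Prop := ∀ (message : String) (nbRep : Int), Dom_calculNbMess message nbRep → Pre_calculNbMess message nbRep → Spec_calculNbMess message nbRep (calculNbMess message nbRep)

-- ===== LEMMAS AND PROOFS =====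

-- Ceiling division: bounds for q = -((-a) // b) at q itself.
theorem pvCeilBounds (a b : Int) (hb : 0 < b) :
    (-(PySem.Int.floordiv (-a) b) - 1) * b < a ∧ a ≤ -(PySem.Int.floordiv (-a) b) * b :=
  (PySem.Int.neg_floordiv_neg_eq_iff_of_pos hb).mp rfl

-- A's loop computed in closed form: with enough fuel it performs exactly
-- max 0 (⌈(nbRep - totalRep)/b⌉ - 1) iterations.
theorem pvLoopEq (nbRep b : Int) (hb : 1 ≤ b) :
    ∀ (fuel : Nat) (totalRep tab0 : Int), nbRep - totalRep ≤ (fuel : Int) + b →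
      calculNbMessLoop nbRep b fuel (totalRep, tab0) =
        (totalRep + (max 0 (-(PySem.Int.floordiv (-(nbRep - totalRep)) b) - 1)) * b,
         tab0 + max 0 (-(PySem.Int.floordiv (-(nbRep - totalRep)) b) - 1)) := by
  intro fuel
  induction fuel with
  | zero =>
    intro totalRep tab0 hle
    obtain ⟨h1, h2⟩ := pvCeilBounds (nbRep - totalRep) b (by omega)
    set q := -(PySem.Int.floordiv (-(nbRep - totalRep)) b) with hq
    have hq1 : q ≤ 1 := by
      by_contra h
      have hmul := mul_le_mul_of_nonneg_right (show (1:ℤ) ≤ q - 1 by omega) (show (0:ℤ) ≤ b by omega)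
      omega
    have : max 0 (q - 1) = 0 := by omega
    simp [calculNbMessLoop, this]
  | succ fuel ih =>
    intro totalRep tab0 hle
    by_cases hcond : b < nbRep - totalRep
    · have hrec := ih (totalRep + b) (tab0 + 1) (by push_cast at hle; omega)
      obtain ⟨h1, h2⟩ := pvCeilBounds (nbRep - totalRep) b (by omega)
      set q := -(PySem.Int.floordiv (-(nbRep - totalRep)) b) with hq
      -- ⌈(d - b)/b⌉ = ⌈d/b⌉ - 1
      have hshift : -(PySem.Int.floordiv (-(nbRep - (totalRep + b))) b) = q - 1 := by
        rw [PySem.Int.neg_floordiv_neg_eq_iff_of_pos (by omega)]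
        constructor <;> nlinarith
      have hq2 : 2 ≤ q := by
        by_contra h
        have hmul := mul_le_mul_of_nonneg_right (show q ≤ 1 by omega) (show (0:ℤ) ≤ b by omega)
        omega
      rw [show calculNbMessLoop nbRep b (fuel + 1) (totalRep, tab0)
            = calculNbMessLoop nbRep b fuel (totalRep + b, tab0 + 1) by
            simp [calculNbMessLoop, hcond], hrec, hshift]
      have hm1 : max 0 (q - 1 - 1) = q - 2 := by omega
      have hm2 : max 0 (q - 1) = q - 1 := by omega
      rw [hm1, hm2]
      simp only [Prod.mk.injEq]
      exact ⟨by ring, by ring⟩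
    · obtain ⟨h1, h2⟩ := pvCeilBounds (nbRep - totalRep) b (by omega)
      set q := -(PySem.Int.floordiv (-(nbRep - totalRep)) b) with hq
      have hq1 : q ≤ 1 := by
        by_contra h
        have hmul := mul_le_mul_of_nonneg_right (show (1:ℤ) ≤ q - 1 by omega) (show (0:ℤ) ≤ b by omega)
        omega
      have : max 0 (q - 1) = 0 := by omega
      simp [calculNbMessLoop, hcond, this]

-- ===== VERDICT (by name: the statement is the Claim_ definition above) =====
theorem calculNbMess_spec : Claim_equal_calculNbMess := by
  intro message nbRep _hdom hpre
  unfold Spec_calculNbMess calculNbMess calculNbMess_alt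
  simp only []
  set L := PySem.Str.len message with hLdef
  have hL : 0 ≤ L := by rw [hLdef, PySem.Str.len_eq]; positivity
  set q5 := PySem.Int.floordiv nbRep 5 with hq5
  by_cases hbr : 2000 < (L + 1) * q5
  · -- branch taken
    have hq5pos : 1 ≤ q5 := by nlinarith
    have hn5 : 5 ≤ nbRep := by
      have : q5 = nbRep / 5 := by rw [hq5, PySem.Int.floordiv_eq_ediv_of_pos (by norm_num)]
      omega
    have hL2000 : L < 2000 := by
      rcases hpre with h | h
      · exact h
      · omega
    set b := PySem.Int.floordiv 2000 (L + 1) with hbdef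
    have hb1 : 1 ≤ b := by
      rw [hbdef, PySem.Int.le_floordiv_iff_mul_le (by omega)]
      omega
    have hfuel : nbRep - b * 5 ≤ ((nbRep.toNat + 1 : Nat) : Int) + b := by
      have : ((nbRep.toNat : Nat) : Int) = nbRep := Int.toNat_of_nonneg (by omega)
      push_cast
      omega
    rw [if_pos hbr, if_pos hbr, pvLoopEq nbRep b hb1 (nbRep.toNat + 1) (b * 5) 5 hfuel]
    -- ⌈(nbRep - 5b)/b⌉ = ⌈nbRep/b⌉ - 5
    set q := -(PySem.Int.floordiv (-nbRep) b) with hqdef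
    obtain ⟨h1, h2⟩ := pvCeilBounds nbRep b (by omega)
    have hshift : -(PySem.Int.floordiv (-(nbRep - b * 5)) b) = q - 5 := by
      rw [PySem.Int.neg_floordiv_neg_eq_iff_of_pos (by omega)]
      constructor <;> nlinarith
    rw [hshift]
    have : q - 5 - 1 = q - 6 := by ring
    rw [this]
    set k := max 0 (q - 6) with hk
    have hlast : nbRep - (b * 5 + k * b) = nbRep - (5 + k) * b := by ring
    simp [hlast]
  · rw [if_neg hbr, if_neg hbr]
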